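-- pv_equiv track=rewrite | github.com/zzzsochi/zini | zini.py | tokenize_sections
-- ===== SOURCE A (Python) =====
-- class ParseError(Exception):
--     def __init__(self, n, line, comment=None):
--         super().__init__(n, line)
--         self.n = n
--         self.line = line
--         self.comment = comment
--
--     def __str__(self):  # pragma: no cover
--         if self.comment:
--             return ("error in line {s.n}: {s.line!r}\n"
--                     "{s.comment}".format(s=self))
--         else:
--             return "error in line {s.n}: {s.line!r}".format(s=self)
--
-- def tokenize_sections(lines):
--     lines = ((n, l.rstrip()) for n, l in lines)
--
--     for n, line in lines:
--
--         if not line: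
--             continue
--         elif line and line[0] in '#;':
--             continue
--         elif line.startswith('[') and line.endswith(']'):
--             section_key = line[1:-1]
--             break
--         else:
--             raise ParseError(n, line)
--     else:
--         return
--
--     section_token = []
--     for n, line in lines:
--         if line and line[0] in '#;':
--             continue
--         if line.startswith('[') and line.endswith(']'):
--             if section_token:
--                 yield section_key, section_token
--
--             section_key = line[1:-1]
--             section_token = []
--         else:
--             section_token.append((n, line))
--     else:
--         if section_token:
--             yield section_key, section_token
-- ===== SOURCE B (Python) =====
-- class ParseError(Exception):
--     def __init__(self, n, line, comment=None):
--         super().__init__(n, line)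
--         self.n = n
--         self.line = line
--         self.comment = comment
--
--
-- def tokenize_sections(lines):
--     # back-to-front construction: walk the rstripped lines in REVERSE, collecting
--     # body lines until a header is met (which closes them into a section); what is
--     # left over at the end is the pre-header prefix, which must be all blank.
--     proc = [(n, l.rstrip()) for n, l in lines]
--     sections = []
--     body = []
--     for n, l in reversed(proc):
--         if l.startswith('[') and l.endswith(']'):
--             if body:
--                 sections.append((l[1:-1], body[::-1]))
--             body = []
--         elif l and l[0] in '#;':
--             continue
--         else:
--             body.append((n, l))
--     for n, l in reversed(body):
--         if l:
--             raise ParseError(n, l)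
--     yield from reversed(sections)
-- ===== Notes on version B (the rewrite author's own statement) =====
-- stated objective: alternative
-- what changed: Builds the result back-to-front: one reverse traversal that accumulates body lines until a header closes them into a section, with the pre-header ParseError check deferred to the leftover accumulator, instead of A's forward header-search loop followed by a forward section-building loop.
import Mathlib
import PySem

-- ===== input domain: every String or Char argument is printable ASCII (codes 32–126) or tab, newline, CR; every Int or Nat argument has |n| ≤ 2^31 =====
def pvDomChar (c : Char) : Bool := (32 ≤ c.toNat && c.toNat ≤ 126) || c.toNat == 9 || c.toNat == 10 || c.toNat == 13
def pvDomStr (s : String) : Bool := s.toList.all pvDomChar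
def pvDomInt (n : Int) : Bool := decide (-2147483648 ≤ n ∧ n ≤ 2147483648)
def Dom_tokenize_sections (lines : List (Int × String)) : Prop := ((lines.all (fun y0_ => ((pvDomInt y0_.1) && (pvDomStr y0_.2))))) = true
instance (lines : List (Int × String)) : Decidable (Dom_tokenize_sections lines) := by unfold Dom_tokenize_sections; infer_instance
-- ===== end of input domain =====

-- B builds the result back-to-front (one reverse traversal closing bodies at headers,
-- ParseError check deferred to the leftover accumulator) instead of A's two forward
-- loops; objective: alternative. A is a generator, compared as the list it yields.

-- shared line classifiers (exact ports of the Python tests on an rstripped line)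
-- `line and line[0] in '#;'`
def pvIsComment (l : String) : Bool :=
  match l.toList with
  | c :: _ => c = '#' || c = ';'
  | [] => false

-- `line.startswith('[') and line.endswith(']')`
def pvIsHeader (l : String) : Bool :=
  PySem.Str.startswith l "[" && PySem.Str.endswith l "]"

-- `line[1:-1]`
def pvKey (l : String) : String := PySem.Str.slice l (some 1) (some (-1))

-- ===== PORT A =====
-- first loop: scan for the first section header (none = ParseError or no header at all;
-- the ParseError case is excluded by Pre_tokenize_sections, the no-header case returns [])
def pvLoop1 : List (Int × String) → Option (String × List (Int × String))
  | [] => none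
  | (_, raw) :: rest =>
    let line := PySem.Str.rstrip raw
    if line = "" then pvLoop1 rest
    else if pvIsComment line then pvLoop1 rest
    else if pvIsHeader line then some (pvKey line, rest)
    else none

-- second loop: accumulate section bodies, yielding on each new header
def pvLoop2 : String → List (Int × String) → List (Int × String) → List (String × (List (Int × String)))
  | key, tok, [] => if tok.isEmpty then [] else [(key, tok)]
  | key, tok, (n, raw) :: rest =>
    let line := PySem.Str.rstrip raw
    if pvIsComment line then pvLoop2 key tok rest
    else if pvIsHeader line then
      if tok.isEmpty then pvLoop2 (pvKey line) [] rest
      else (key, tok) :: pvLoop2 (pvKey line) [] rest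
    else pvLoop2 key (tok ++ [(n, line)]) rest

def tokenize_sections (lines : List (Int × String)) : List (String × (List (Int × String))) :=
  match pvLoop1 lines with
  | none => []
  | some (key, rest) => pvLoop2 key [] rest

-- ===== PORT B =====
-- loop body of Source B's reverse traversal; state = (sections, body), both built by append
def pvStep (st : List (String × List (Int × String)) × List (Int × String))
    (p : Int × String) : List (String × List (Int × String)) × List (Int × String) :=
  if pvIsHeader p.2 then
    (if st.2.isEmpty then st.1 else st.1 ++ [(pvKey p.2, st.2.reverse)], [])
  else if pvIsComment p.2 then st
  else (st.1, st.2 ++ [p])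

def tokenize_sections_alt (lines : List (Int × String)) : List (String × (List (Int × String))) :=
  let proc := lines.map (fun p => (p.1, PySem.Str.rstrip p.2))
  let st := proc.reverse.foldl pvStep ([], [])
  -- `for n, l in reversed(body): if l: raise ParseError(n, l)`: raises iff some leftover
  -- line is non-blank (scan order does not affect the returned value); [] on the raise
  -- path, which Pre_tokenize_sections excludes
  if st.2.any (fun q => q.2 ≠ "") then []
  else st.1.reverse

-- ===== PRECONDITION & SPEC =====
-- Pre_ excludes exactly the inputs on which A raises ParseError: those whose first
-- non-blank non-comment rstripped line is not a [section] header.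
def Pre_tokenize_sections (lines : List (Int × String)) : Prop :=
  (((lines.map (fun p => PySem.Str.rstrip p.2)).filter
      (fun l => !(l = "" || pvIsComment l))).head?.all pvIsHeader) = true
instance (lines : List (Int × String)) : Decidable (Pre_tokenize_sections lines) := by
  unfold Pre_tokenize_sections; infer_instance

def pvWitness_tokenize_sections : (List (Int × String)) :=
  [(1, "[a]"), (2, "x = 1"), (3, "# c"), (4, ""), (5, "[b]"), (6, "y")]

def Spec_tokenize_sections (lines : List (Int × String)) (out : List (String × (List (Int × String)))) : Prop := out = tokenize_sections_alt lines
instance (lines : List (Int × String)) (out : List (String × (List (Int × String)))) : Decidable (Spec_tokenize_sections lines out) := by unfold Spec_tokenize_sections; infer_instance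

-- ===== CLAIM (what is proved, stated in full; the proofs are below) =====
def Claim_equal_tokenize_sections : Prop := ∀ (lines : List (Int × String)), Dom_tokenize_sections lines → Pre_tokenize_sections lines → Spec_tokenize_sections lines (tokenize_sections lines)

-- ===== LEMMAS AND PROOFS =====

-- a header line starts with '[', so it is never a comment line
theorem header_not_comment (l : String) (h : pvIsHeader l = true) : pvIsComment l = false := by
  unfold pvIsHeader at h
  rw [Bool.and_eq_true] at h
  have h1 := (PySem.Chars.startswith_iff (s := l.toList) (p := "[".toList)).mp (by
    simpa using h.1)
  have hlt : "[".toList = ['['] := rfl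
  rw [hlt] at h1
  obtain ⟨t, ht⟩ := h1
  unfold pvIsComment
  rw [← ht]
  simp

-- B's state after consuming (n, raw) :: rest, unfolded one step
def pvState (lines : List (Int × String)) :
    List (String × List (Int × String)) × List (Int × String) :=
  (lines.map (fun p => (p.1, PySem.Str.rstrip p.2))).reverse.foldl pvStep ([], [])

theorem pvState_cons (n : Int) (raw : String) (rest : List (Int × String)) :
    pvState ((n, raw) :: rest) = pvStep (pvState rest) (n, PySem.Str.rstrip raw) := by
  simp [pvState, List.foldl_append]

theorem alt_eq_state (lines : List (Int × String)) :
    tokenize_sections_alt lines =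
      if (pvState lines).2.any (fun q => q.2 ≠ "") then []
      else (pvState lines).1.reverse := rfl

-- A's second loop computed from B's back-to-front state
theorem loop2_state (ls : List (Int × String)) :
    ∀ key tok, pvLoop2 key tok ls =
      if (tok ++ (pvState ls).2.reverse).isEmpty then (pvState ls).1.reverse
      else (key, tok ++ (pvState ls).2.reverse) :: (pvState ls).1.reverse := by
  induction ls with
  | nil =>
    intro key tok
    show pvLoop2 key tok [] = _
    simp [pvLoop2, pvState]
  | cons p rest ih =>
    intro key tok
    obtain ⟨n, raw⟩ := p
    rw [pvState_cons]
    simp only [pvLoop2, pvStep]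
    by_cases hh : pvIsHeader (PySem.Str.rstrip raw) = true
    · have hcf := header_not_comment _ hh
      by_cases hb : (pvState rest).2 = [] <;> by_cases ht : tok = [] <;>
        simp [hh, hcf, ih, hb, ht]
    · by_cases hc : pvIsComment (PySem.Str.rstrip raw) = true
      · simp [hh, hc, ih]
      · simp [hh, hc, ih, List.append_assoc]

theorem loopB_closed (ls : List (Int × String)) :
    Pre_tokenize_sections ls → tokenize_sections_alt ls = tokenize_sections ls := by
  induction ls with
  | nil => intro _; rfl
  | cons p rest ih =>
    intro hpre
    obtain ⟨n, raw⟩ := p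
    simp only [Pre_tokenize_sections, List.map_cons, List.filter_cons] at hpre
    rw [alt_eq_state, pvState_cons]
    simp only [tokenize_sections, pvLoop1, pvStep]
    by_cases hb : PySem.Str.rstrip raw = ""
    · rw [if_neg (by simp [hb, pvIsComment])] at hpre
      have := ih hpre
      rw [alt_eq_state] at this
      simp only [tokenize_sections] at this
      have hh : pvIsHeader "" = false := rfl
      have hc : pvIsComment "" = false := rfl
      simp only [hb, hh, hc, Bool.false_eq_true, if_false]
      rw [List.any_append]
      have hdec : (decide (("" : String) ≠ "")) = false := by decide
      simp only [List.any_cons, List.any_nil, hdec, Bool.or_false]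
      simpa using this
    · by_cases hc : pvIsComment (PySem.Str.rstrip raw) = true
      · rw [if_neg (by simp [hb, hc])] at hpre
        have hh : pvIsHeader (PySem.Str.rstrip raw) = false := by
          by_contra h
          rw [header_not_comment _ (by simpa using h)] at hc
          exact absurd hc (by simp)
        have := ih hpre
        rw [alt_eq_state] at this
        simp only [tokenize_sections] at this
        simp only [hh, hc, Bool.false_eq_true, if_false, if_true, if_neg hb]
        exact this
      · rw [if_pos (by simp [hb, hc]), List.head?_cons, Option.all_some] at hpre
        simp only [hpre, hc, Bool.false_eq_true, if_false, if_true, if_neg hb, loop2_state]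
        by_cases he : (pvState rest).2 = [] <;> simp [he]

-- ===== VERDICT (by name: the statement is the Claim_ definition above) =====
theorem tokenize_sections_spec : Claim_equal_tokenize_sections := by
  intro lines _ hpre
  unfold Spec_tokenize_sections
  exact (loopB_closed lines hpre).symm
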